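-- pv_equiv track=rewrite | github.com/M1rkl/bfu-asd | asdlab3.py | generate
-- ===== SOURCE A (Python) =====
-- def generate(x):
--     results = set()  # Множество уникальных значений
--     max_k = 0
--     max_l = 0
--     max_m = 0
--
--     # Максимальные показатели K, L, M, чтобы не превышать x
--     while 3**max_k <= x:
--         max_k += 1
--     while 5**max_l <= x:
--         max_l += 1
--     while 7**max_m <= x:
--         max_m += 1
--
--     # Генерируем числа не используя ранние вложенные циклов
--     for k in range(max_k):
--         p3 = 3**k
--         for l in range(max_l):
--             p5 = 5**l
--             for m in range(max_m):
--                 p7 = 7**m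
--                 number = p3 * p5 * p7
--                 if number <= x:  # Не превышает ли это число x
--                     results.add(number)
--
--     return sorted(results)
-- ===== SOURCE B (Python) =====
-- def generate(x):
--     # Build the lists of powers of 3, 5, 7 not exceeding x by direct
--     # multiplication, then sort the products that fit; the products
--     # 3^k*5^l*7^m are pairwise distinct, so no dedup set is needed.
--     def powers(p, v=1):
--         if v > x:
--             return []
--         return [v] + powers(p, v * p)
--
--     return sorted(a * b * c
--                   for a in powers(3)
--                   for b in powers(5)
--                   for c in powers(7)
--                   if a * b * c <= x)
-- ===== Notes on version B (the rewrite author's own statement) =====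
-- stated objective: simpler
-- what changed: B drops A's exponent-counting while loops, triple nested range loops recomputing powers with **, and the dedup set: it builds the three power lists by recursive multiplication and sorts a single comprehension of in-range products, relying on the products being pairwise distinct.
import Mathlib
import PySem

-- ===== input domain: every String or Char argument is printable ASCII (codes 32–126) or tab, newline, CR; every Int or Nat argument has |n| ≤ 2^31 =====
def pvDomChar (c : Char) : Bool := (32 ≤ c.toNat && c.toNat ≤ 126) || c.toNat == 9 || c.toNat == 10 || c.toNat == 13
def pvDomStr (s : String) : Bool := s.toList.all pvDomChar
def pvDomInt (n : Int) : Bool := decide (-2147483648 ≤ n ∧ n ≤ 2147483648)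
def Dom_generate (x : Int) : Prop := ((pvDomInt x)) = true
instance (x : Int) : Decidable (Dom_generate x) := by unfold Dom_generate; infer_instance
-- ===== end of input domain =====

-- B replaces A's exponent-bound while loops, triple nested range loops with ** and dedup set
-- by recursive power lists and one sorted comprehension of products (simpler; no speed claim).


-- ===== PORT A =====
-- 'while p**k <= x: k += 1', with a fuel counter that only makes the recursion total:
-- fuel 64 is never exhausted for p ≥ 2 on the stated domain |x| ≤ 2^31 (proved in the lemmas)
def maxExpFuel (p x : Int) : Nat → Nat → Int
  | 0, k => (k : Int)
  | fuel + 1, k => if p ^ k ≤ x then maxExpFuel p x fuel (k + 1) else (k : Int)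

def generate (x : Int) : List Int :=
  -- results = set(); the three while loops computing max_k, max_l, max_m
  let maxK := maxExpFuel 3 x 64 0
  let maxL := maxExpFuel 5 x 64 0
  let maxM := maxExpFuel 7 x 64 0
  -- triple nested 'for … in range(…)'; '3**k' is '3 ^ k.toNat' (exact: k from range is ≥ 0)
  let results : PySem.Set Int :=
    (PySem.List.pyRange 0 maxK 1).foldl (fun s k =>
      let p3 : Int := 3 ^ k.toNat
      (PySem.List.pyRange 0 maxL 1).foldl (fun s l =>
        let p5 : Int := 5 ^ l.toNat
        (PySem.List.pyRange 0 maxM 1).foldl (fun s m =>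
          let p7 : Int := 7 ^ m.toNat
          let number := p3 * p5 * p7
          if number ≤ x then PySem.Set.add s number else s) s) s)
      PySem.Set.empty
  PySem.List.sorted results (fun v => v) false

-- ===== PORT B =====
-- powers(p, v) of Source B, with the same totality-only fuel counter (never exhausted on the domain)
def powersFuel (p x : Int) : Nat → Int → List Int
  | 0, _ => []
  | fuel + 1, v => if v > x then [] else v :: powersFuel p x fuel (v * p)

def generate_alt (x : Int) : List Int :=
  PySem.List.sorted
    ((powersFuel 3 x 64 1).flatMap fun a =>
      (powersFuel 5 x 64 1).flatMap fun b =>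
        (powersFuel 7 x 64 1).filterMap fun c =>
          if a * b * c ≤ x then some (a * b * c) else none)
    (fun v => v) false

-- ===== PRECONDITION & SPEC =====
def Spec_generate (x : Int) (out : List Int) : Prop := out = generate_alt x
instance (x : Int) (out : List Int) : Decidable (Spec_generate x out) := by unfold Spec_generate; infer_instance

-- ===== CLAIM (what is proved, stated in full; the proofs are below) =====
def Claim_equal_generate : Prop := ∀ (x : Int), Dom_generate x → Spec_generate x (generate x)

-- ===== LEMMAS AND PROOFS =====

-- the set both programs enumerate
def Smooth (x n : Int) : Prop := ∃ k l m : Nat, n = 3 ^ k * 5 ^ l * 7 ^ m ∧ n ≤ x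

-- proof-side names for the two pre-sort lists (tied to the ports by rfl below)
def aList (x : Int) : PySem.Set Int :=
  (PySem.List.pyRange 0 (maxExpFuel 3 x 64 0) 1).foldl (fun s k =>
    (PySem.List.pyRange 0 (maxExpFuel 5 x 64 0) 1).foldl (fun s l =>
      (PySem.List.pyRange 0 (maxExpFuel 7 x 64 0) 1).foldl (fun s m =>
        if 3 ^ k.toNat * 5 ^ l.toNat * 7 ^ m.toNat ≤ x
        then PySem.Set.add s (3 ^ k.toNat * 5 ^ l.toNat * 7 ^ m.toNat) else s) s) s)
    PySem.Set.empty

def bList (x : Int) : List Int :=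
  (powersFuel 3 x 64 1).flatMap fun a =>
    (powersFuel 5 x 64 1).flatMap fun b =>
      (powersFuel 7 x 64 1).filterMap fun c =>
        if a * b * c ≤ x then some (a * b * c) else none

lemma generate_eq_sorted (x : Int) :
    generate x = PySem.List.sorted (aList x) (fun v => v) false := rfl

lemma generate_alt_eq_sorted (x : Int) :
    generate_alt x = PySem.List.sorted (bList x) (fun v => v) false := rfl

-- fuel 64 suffices: on the domain, x < p ^ 64 for every p ≥ 3
lemma suff64 (p x : Int) (hp : 3 ≤ p) (hx : x ≤ 2147483648) : x < p ^ 64 :=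
  lt_of_le_of_lt hx (lt_of_lt_of_le (by norm_num : (2147483648:Int) < 3 ^ 64)
    (pow_le_pow_left₀ (by norm_num) hp 64))

-- each power 3^k, 5^l, 7^m is bounded by the full product when the others are ≥ 1
lemma factors_le (k l m : Nat) (x : Int) (hc : (3:Int) ^ k * 5 ^ l * 7 ^ m ≤ x) :
    (3:Int) ^ k ≤ x ∧ (5:Int) ^ l ≤ x ∧ (7:Int) ^ m ≤ x := by
  have h3 : (1:Int) ≤ 3 ^ k := one_le_pow₀ (by norm_num)
  have h5 : (1:Int) ≤ 5 ^ l := one_le_pow₀ (by norm_num)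
  have h7 : (1:Int) ≤ 7 ^ m := one_le_pow₀ (by norm_num)
  refine ⟨?_, ?_, ?_⟩ <;>
    nlinarith [hc, h3, h5, h7, mul_le_mul h3 h5 (by positivity) (by positivity),
      mul_le_mul h3 h7 (by positivity) (by positivity),
      mul_le_mul h5 h7 (by positivity) (by positivity)]

-- generic membership / nodup through a set-building foldl
lemma mem_foldl_set {α : Type} (g : PySem.Set Int → α → PySem.Set Int) (Q : α → Int → Prop)
    (hg : ∀ s a n, n ∈ g s a ↔ n ∈ s ∨ Q a n) :
    ∀ (l : List α) (s : PySem.Set Int) (n : Int),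
      n ∈ l.foldl g s ↔ n ∈ s ∨ ∃ a ∈ l, Q a n := by
  intro l
  induction l with
  | nil => simp
  | cons a t ih =>
    intro s n
    simp only [List.foldl_cons, ih, hg, List.mem_cons]
    constructor
    · rintro ((hs | hq) | ⟨b, hb, hq⟩)
      · exact Or.inl hs
      · exact Or.inr ⟨a, Or.inl rfl, hq⟩
      · exact Or.inr ⟨b, Or.inr hb, hq⟩
    · rintro (hs | ⟨b, rfl | hb, hq⟩)
      · exact Or.inl (Or.inl hs)
      · exact Or.inl (Or.inr hq)
      · exact Or.inr ⟨b, hb, hq⟩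

lemma nodup_foldl_set {α : Type} (g : PySem.Set Int → α → PySem.Set Int)
    (hg : ∀ s a, s.Nodup → (g s a).Nodup) :
    ∀ (l : List α) (s : PySem.Set Int), s.Nodup → (l.foldl g s).Nodup := by
  intro l
  induction l with
  | nil => intro s h; simpa using h
  | cons a t ih => intro s h; exact ih _ (hg _ _ h)

lemma maxExpFuel_ge (p x : Int) : ∀ (fuel k : Nat), (k : Int) ≤ maxExpFuel p x fuel k := by
  intro fuel
  induction fuel with
  | zero => intro k; simp [maxExpFuel]
  | succ f ih =>
    intro k
    rw [maxExpFuel]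
    split
    · have := ih (k + 1); push_cast at this ⊢; omega
    · omega

lemma lt_maxExpFuel (p x : Int) (hp : 2 ≤ p) :
    ∀ (fuel k0 j : Nat), x < p ^ (k0 + fuel) → k0 ≤ j → p ^ j ≤ x →
      (j : Int) < maxExpFuel p x fuel k0 := by
  intro fuel
  induction fuel with
  | zero =>
    intro k0 j hsuff hkj hpj
    have := pow_le_pow_right₀ (by omega : 1 ≤ p) hkj
    simp only [Nat.add_zero] at hsuff
    omega
  | succ f ih =>
    intro k0 j hsuff hkj hpj
    rw [maxExpFuel]
    split
    · rcases Nat.eq_or_lt_of_le hkj with heq | hlt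
      · have := maxExpFuel_ge p x f (k0 + 1); push_cast at this ⊢; omega
      · exact ih (k0 + 1) j (by rwa [show k0 + 1 + f = k0 + (f + 1) by omega]) (by omega) hpj
    · rename_i h
      have := pow_le_pow_right₀ (by omega : 1 ≤ p) hkj
      omega

-- a nonnegative exponent with p^j ≤ x lies below the loop bound, as an Int-range membership
lemma natCast_mem_pyRange_maxExp (p x : Int) (hp : 3 ≤ p) (hx : x ≤ 2147483648)
    (j : Nat) (hj : p ^ j ≤ x) :
    (j : Int) ∈ PySem.List.pyRange 0 (maxExpFuel p x 64 0) 1 := by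
  rw [PySem.List.mem_pyRange_one]
  exact ⟨by omega, lt_maxExpFuel p x (by omega) 64 0 j (by simpa using suff64 p x hp hx) (by omega) hj⟩

-- membership of the A-side set (on the domain, where fuel 64 suffices)
lemma mem_aList (x : Int) (hx : x ≤ 2147483648) (n : Int) : n ∈ aList x ↔ Smooth x n := by
  unfold aList
  rw [mem_foldl_set _
    (fun k n => ∃ l m : Nat, n = 3 ^ k.toNat * 5 ^ l * 7 ^ m ∧ n ≤ x)
    (fun s k n => by
      rw [mem_foldl_set _
        (fun l n => ∃ m : Nat, n = 3 ^ k.toNat * 5 ^ l.toNat * 7 ^ m ∧ n ≤ x)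
        (fun s l n => by
          rw [mem_foldl_set _
            (fun m n => 3 ^ k.toNat * 5 ^ l.toNat * 7 ^ m.toNat ≤ x ∧
              n = 3 ^ k.toNat * 5 ^ l.toNat * 7 ^ m.toNat)
            (fun s m n => by
              split_ifs with h
              · simp only [PySem.Set.mem_add]; tauto
              · tauto)]
          constructor
          · rintro (hs | ⟨m, hm, hc, rfl⟩)
            · exact Or.inl hs
            · exact Or.inr ⟨m.toNat, rfl, hc⟩
          · rintro (hs | ⟨m, rfl, hc⟩)
            · exact Or.inl hs
            · refine Or.inr ⟨(m : Int), ?_, by simpa using hc, by simp⟩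
              simpa using natCast_mem_pyRange_maxExp 7 x (by norm_num) hx m
                ((factors_le k.toNat l.toNat m x (by simpa using hc)).2.2))]
      constructor
      · rintro (hs | ⟨l, hl, m, rfl, hc⟩)
        · exact Or.inl hs
        · exact Or.inr ⟨l.toNat, m, rfl, hc⟩
      · rintro (hs | ⟨l, m, rfl, hc⟩)
        · exact Or.inl hs
        · refine Or.inr ⟨(l : Int), ?_, m, by simp, hc⟩
          simpa using natCast_mem_pyRange_maxExp 5 x (by norm_num) hx l
            ((factors_le k.toNat l m x hc).2.1))]
  unfold Smooth
  constructor
  · rintro (hs | ⟨k, hk, l, m, rfl, hc⟩)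
    · simp [PySem.Set.empty] at hs
    · exact ⟨k.toNat, l, m, rfl, hc⟩
  · rintro ⟨k, l, m, rfl, hc⟩
    refine Or.inr ⟨(k : Int), ?_, l, m, by simp, hc⟩
    simpa using natCast_mem_pyRange_maxExp 3 x (by norm_num) hx k
      ((factors_le k l m x hc).1)

lemma nodup_aList (x : Int) : (aList x).Nodup := by
  unfold aList
  refine nodup_foldl_set _ (fun s k hs => ?_) _ _ List.nodup_nil
  refine nodup_foldl_set _ (fun s l hs => ?_) _ _ hs
  refine nodup_foldl_set _ (fun s m hs => ?_) _ _ hs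
  split_ifs with h
  · exact PySem.Set.nodup_add _ _ hs
  · exact hs

-- B side: characterization of powersFuel
lemma mem_powersFuel (p x : Int) (hp : 2 ≤ p) :
    ∀ (fuel : Nat) (v : Int), 1 ≤ v → x < v * p ^ fuel →
      ∀ n, n ∈ powersFuel p x fuel v ↔ ∃ j : Nat, n = v * p ^ j ∧ n ≤ x := by
  intro fuel
  induction fuel with
  | zero =>
    intro v hv hsuff n
    simp only [powersFuel, List.not_mem_nil, false_iff]
    rintro ⟨j, rfl, hle⟩
    have h1 : (1:Int) ≤ p ^ j := one_le_pow₀ (by omega)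
    simp only [pow_zero, mul_one] at hsuff
    nlinarith
  | succ f ih =>
    intro v hv hsuff n
    rw [powersFuel]
    split
    · rename_i h
      simp only [List.not_mem_nil, false_iff]
      rintro ⟨j, rfl, hle⟩
      have h1 : (1:Int) ≤ p ^ j := one_le_pow₀ (by omega)
      nlinarith
    · rename_i h
      have hv' : 1 ≤ v * p := by nlinarith
      have hsuff' : x < v * p * p ^ f := by
        have : v * p * p ^ f = v * p ^ (f + 1) := by ring
        rw [this]; exact hsuff
      simp only [List.mem_cons, ih (v * p) hv' hsuff']
      constructor
      · rintro (rfl | ⟨j, rfl, hle⟩)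
        · exact ⟨0, by simp, by omega⟩
        · exact ⟨j + 1, by ring, hle⟩
      · rintro ⟨j, rfl, hle⟩
        cases j with
        | zero => exact Or.inl (by simp)
        | succ j => exact Or.inr ⟨j, by ring, hle⟩

lemma le_of_mem_powersFuel (p x : Int) (hp : 2 ≤ p) :
    ∀ (fuel : Nat) (v : Int), 1 ≤ v → ∀ n, n ∈ powersFuel p x fuel v → v ≤ n := by
  intro fuel
  induction fuel with
  | zero => intro v hv n hn; simp [powersFuel] at hn
  | succ f ih =>
    intro v hv n hn
    rw [powersFuel] at hn
    split at hn
    · simp at hn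
    · rcases List.mem_cons.mp hn with rfl | hn
      · omega
      · have hv' : 1 ≤ v * p := by nlinarith
        have := ih (v * p) hv' n hn
        nlinarith

lemma nodup_powersFuel (p x : Int) (hp : 2 ≤ p) :
    ∀ (fuel : Nat) (v : Int), 1 ≤ v → (powersFuel p x fuel v).Nodup := by
  intro fuel
  induction fuel with
  | zero => intro v hv; simp [powersFuel]
  | succ f ih =>
    intro v hv
    rw [powersFuel]
    split
    · simp
    · have hv' : 1 ≤ v * p := by nlinarith
      refine List.Nodup.cons (fun hmem => ?_) (ih (v * p) hv')
      have h1 := le_of_mem_powersFuel p x hp f (v * p) hv' v hmem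
      nlinarith

-- uniqueness of the factorization 3^k * 5^l * 7^m (over ℕ, then ℤ)
lemma factor_unique_nat (k l m k' l' m' : Nat)
    (h : 3 ^ k * 5 ^ l * 7 ^ m = 3 ^ k' * 5 ^ l' * 7 ^ m') :
    k = k' ∧ l = l' ∧ m = m' := by
  have h3 := congrArg (Nat.factorization · 3) h
  have h5 := congrArg (Nat.factorization · 5) h
  have h7 := congrArg (Nat.factorization · 7) h
  simp [Nat.factorization_mul, Nat.factorization_pow, Nat.Prime.factorization,
    (by norm_num : Nat.Prime 3), (by norm_num : Nat.Prime 5),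
    (by norm_num : Nat.Prime 7)] at h3 h5 h7
  omega

lemma factor_unique_int (k l m k' l' m' : Nat)
    (h : (3:Int) ^ k * 5 ^ l * 7 ^ m = 3 ^ k' * 5 ^ l' * 7 ^ m') :
    k = k' ∧ l = l' ∧ m = m' := by
  apply factor_unique_nat
  have : ((3 ^ k * 5 ^ l * 7 ^ m : Nat) : Int) = ((3 ^ k' * 5 ^ l' * 7 ^ m' : Nat) : Int) := by
    push_cast; exact h
  exact_mod_cast this

lemma mem_bList (x : Int) (hx : x ≤ 2147483648) (n : Int) : n ∈ bList x ↔ Smooth x n := by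
  have hm3 := mem_powersFuel 3 x (by norm_num) 64 1 (by norm_num) (by simpa using suff64 3 x (by norm_num) hx)
  have hm5 := mem_powersFuel 5 x (by norm_num) 64 1 (by norm_num) (by simpa using suff64 5 x (by norm_num) hx)
  have hm7 := mem_powersFuel 7 x (by norm_num) 64 1 (by norm_num) (by simpa using suff64 7 x (by norm_num) hx)
  unfold bList Smooth
  simp only [List.mem_flatMap, List.mem_filterMap]
  constructor
  · rintro ⟨a, ha, b, hb, c, hc, hval⟩
    rw [hm3] at ha; rw [hm5] at hb; rw [hm7] at hc
    obtain ⟨k, rfl, -⟩ := ha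
    obtain ⟨l, rfl, -⟩ := hb
    obtain ⟨m, rfl, -⟩ := hc
    split_ifs at hval with h
    · obtain rfl := Option.some.inj hval
      exact ⟨k, l, m, by ring, by linarith [h]⟩
  · rintro ⟨k, l, m, rfl, hc⟩
    obtain ⟨h3x, h5x, h7x⟩ := factors_le k l m x hc
    refine ⟨3 ^ k, ?_, 5 ^ l, ?_, 7 ^ m, ?_, ?_⟩
    · rw [hm3]; exact ⟨k, by ring, h3x⟩
    · rw [hm5]; exact ⟨l, by ring, h5x⟩
    · rw [hm7]; exact ⟨m, by ring, h7x⟩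
    · rw [if_pos hc]

lemma nodup_bList (x : Int) (hx : x ≤ 2147483648) : (bList x).Nodup := by
  have hm3 := mem_powersFuel 3 x (by norm_num) 64 1 (by norm_num) (by simpa using suff64 3 x (by norm_num) hx)
  have hm5 := mem_powersFuel 5 x (by norm_num) 64 1 (by norm_num) (by simpa using suff64 5 x (by norm_num) hx)
  have hm7 := mem_powersFuel 7 x (by norm_num) 64 1 (by norm_num) (by simpa using suff64 7 x (by norm_num) hx)
  unfold bList
  rw [List.nodup_flatMap]
  refine ⟨fun a ha => ?_, ?_⟩
  · rw [List.nodup_flatMap]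
    have ha1 : 1 ≤ a := le_of_mem_powersFuel 3 x (by norm_num) 64 1 (by norm_num) _ ha
    refine ⟨fun b hb => ?_, ?_⟩
    · have hb1 : 1 ≤ b := le_of_mem_powersFuel 5 x (by norm_num) 64 1 (by norm_num) _ hb
      refine List.Nodup.filterMap (fun c c' nn hc hc' => ?_)
        (nodup_powersFuel 7 x (by norm_num) 64 1 (by norm_num))
      split_ifs at hc hc' with h1 h2
      · exact mul_left_cancel₀ (by positivity : a * b ≠ 0)
          ((Option.some.inj hc).trans (Option.some.inj hc').symm)
      all_goals simp_all
    · refine List.Pairwise.imp_of_mem (fun {b b'} hb hb' hne => ?_)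
        (nodup_powersFuel 5 x (by norm_num) 64 1 (by norm_num))
      intro nn hn hn'
      simp only [List.mem_filterMap] at hn hn'
      obtain ⟨c, hc, hval⟩ := hn
      obtain ⟨c', hc', hval'⟩ := hn'
      rw [hm3] at ha; rw [hm5] at hb hb'; rw [hm7] at hc hc'
      obtain ⟨k, rfl, -⟩ := ha
      obtain ⟨l, rfl, -⟩ := hb
      obtain ⟨l', rfl, -⟩ := hb'
      obtain ⟨m, rfl, -⟩ := hc
      obtain ⟨m', rfl, -⟩ := hc'
      simp only [one_mul] at hval hval' hne
      split_ifs at hval hval' with h1 h2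
      · obtain rfl := Option.some.inj hval
        obtain e := Option.some.inj hval'
        obtain ⟨-, hl, -⟩ := factor_unique_int k l m k l' m' e.symm
        exact hne (by rw [hl])
  · refine List.Pairwise.imp_of_mem (fun {a a'} ha ha' hne => ?_)
      (nodup_powersFuel 3 x (by norm_num) 64 1 (by norm_num))
    intro nn hn hn'
    simp only [List.mem_flatMap, List.mem_filterMap] at hn hn'
    obtain ⟨b, hb, c, hc, hval⟩ := hn
    obtain ⟨b', hb', c', hc', hval'⟩ := hn'
    rw [hm3] at ha ha'; rw [hm5] at hb hb'; rw [hm7] at hc hc'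
    obtain ⟨k, rfl, -⟩ := ha
    obtain ⟨k', rfl, -⟩ := ha'
    obtain ⟨l, rfl, -⟩ := hb
    obtain ⟨l', rfl, -⟩ := hb'
    obtain ⟨m, rfl, -⟩ := hc
    obtain ⟨m', rfl, -⟩ := hc'
    simp only [one_mul] at hval hval' hne
    split_ifs at hval hval' with h1 h2
    · obtain rfl := Option.some.inj hval
      obtain e := Option.some.inj hval'
      obtain ⟨hk, -, -⟩ := factor_unique_int k l m k' l' m' e.symm
      exact hne (by rw [hk])

lemma aList_perm_bList (x : Int) (hx : x ≤ 2147483648) : (aList x).Perm (bList x) := by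
  rw [List.perm_ext_iff_of_nodup (nodup_aList x) (nodup_bList x hx)]
  intro n
  rw [mem_aList x hx, mem_bList x hx]

-- ===== VERDICT (by name: the statement is the Claim_ definition above) =====
theorem generate_spec : Claim_equal_generate := by
  intro x hdom
  have hx : x ≤ 2147483648 := by
    simp only [Dom_generate, pvDomInt, decide_eq_true_eq] at hdom
    omega
  unfold Spec_generate
  rw [generate_eq_sorted, generate_alt_eq_sorted]
  exact PySem.List.sorted_eq_sorted_of_perm _ _ _ (fun a b h => h) (aList_perm_bList x hx)
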